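-- pv_equiv track=rewrite | github.com/remusao/katas | google-jam/2018/qualification/saving_universe/solve.py | solve
-- ===== SOURCE A (Python) =====
-- def score(program):
--     s = 1
--     total = 0
--     for c in program:
--         if c == 'C':
--             s *= 2
--         else:
--             total += s
--     return total
--
-- def solve(d, program):
--     swaps = 0
--     total = score(program)
--     while total > d:
--         # Try to find a swap
--         for i in range(1, len(program)):
--             if program[i - 1] == 'C' and program[i] == 'S':
--                 swaps += 1
--                 program[i - 1], program[i] = 'S', 'C'
--                 total = score(program)
--                 break
--         else:
--             # Not possible
--             return None
--
--     return swaps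
-- ===== SOURCE B (Python) =====
-- def solve(d, program):
--     # One initial scoring pass, then each swap updates the total and the
--     # search position incrementally instead of rescanning/rescoring.
--     # (Return-value equivalence only: A swaps elements of `program` in
--     # place; B works on a copy and leaves the argument unchanged.)
--     prog = list(program)
--     s = 1
--     total = 0
--     for c in prog:
--         if c == 'C':
--             s *= 2
--         else:
--             total += s
--     swaps = 0
--     n = len(prog)
--     i = 1   # search pointer: no 'C','S' pair starts before index i - 1
--     cs = 0  # number of 'C' among prog[:i-1]
--     while total > d:
--         while i < n and not (prog[i - 1] == 'C' and prog[i] == 'S'):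
--             if prog[i - 1] == 'C':
--                 cs += 1
--             i += 1
--         if i >= n:
--             return None
--         prog[i - 1], prog[i] = 'S', 'C'
--         swaps += 1
--         total -= 2 ** cs
--         if i >= 2 and prog[i - 2] == 'C':
--             i -= 1
--             cs -= 1
--         else:
--             i += 1
--     return swaps
-- ===== Notes on version B (the rewrite author's own statement) =====
-- stated objective: alternative
-- what changed: Each swap now updates the running total by subtracting 2^(number of C's before the pair) and resumes the pair search from a maintained pointer, instead of rescanning the program from the start and rescoring it after every swap; note A swaps program's elements in place while B works on a copy (return values identical).
import Mathlib
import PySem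

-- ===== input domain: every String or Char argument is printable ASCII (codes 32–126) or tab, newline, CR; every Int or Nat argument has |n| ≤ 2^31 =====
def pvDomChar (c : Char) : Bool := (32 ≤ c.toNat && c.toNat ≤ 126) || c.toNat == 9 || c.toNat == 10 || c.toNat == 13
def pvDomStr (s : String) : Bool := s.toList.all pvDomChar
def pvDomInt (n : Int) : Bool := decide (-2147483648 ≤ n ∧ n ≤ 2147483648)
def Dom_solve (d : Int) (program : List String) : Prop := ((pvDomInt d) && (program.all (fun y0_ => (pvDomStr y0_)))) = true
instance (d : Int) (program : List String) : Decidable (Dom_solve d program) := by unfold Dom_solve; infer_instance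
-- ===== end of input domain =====

-- B replaces A's rescan-and-rescore on every swap by one scoring pass plus an
-- incrementally maintained total / search pointer (return-value equivalence only:
-- Python A swaps elements of `program` in place, B works on a copy).

-- ===== PORT A =====

-- A's score(): for-loop over the program carrying (s, total)
def scoreStep (p : Int × Int) (c : String) : Int × Int :=
  if c = "C" then (p.1 * 2, p.2) else (p.1, p.2 + p.1)

def score (program : List String) : Int := (program.foldl scoreStep (1, 0)).2

-- A's inner for-loop: find the first i with program[i-1]='C', program[i]='S'
-- and return the swapped list (none = the for-loop's else branch).
def findSwap : List String → Option (List String)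
  | [] => none
  | [_] => none
  | a :: b :: rest =>
    if a = "C" ∧ b = "S" then some ("S" :: "C" :: rest)
    else (findSwap (b :: rest)).map (a :: ·)

-- structural helper used only to justify termination of A's while-loop
def scoreAux (s : Int) : List String → Int
  | [] => 0
  | c :: rest => if c = "C" then scoreAux (2 * s) rest else s + scoreAux s rest

theorem scoreAux_cons (s : Int) (c : String) (l : List String) :
    scoreAux s (c :: l) = if c = "C" then scoreAux (2 * s) l else s + scoreAux s l := rfl

theorem foldl_scoreStep (l : List String) : ∀ s t : Int,
    l.foldl scoreStep (s, t) = (s * 2 ^ (l.countP (· = "C")), t + scoreAux s l) := by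
  induction l with
  | nil => intro s t; simp [scoreAux]
  | cons c rest ih =>
    intro s t
    rw [List.foldl_cons, scoreAux_cons]
    by_cases hc : c = "C"
    · rw [show scoreStep (s, t) c = (2 * s, t) from by simp [scoreStep, hc, mul_comm], ih,
        show (c :: rest).countP (· = "C") = rest.countP (· = "C") + 1 from by
          simp [List.countP_cons, hc], if_pos hc, Prod.mk.injEq]
      exact ⟨by ring, rfl⟩
    · rw [show scoreStep (s, t) c = (s, t + s) from by simp [scoreStep, hc], ih,
        show (c :: rest).countP (· = "C") = rest.countP (· = "C") from by
          simp [List.countP_cons, hc], if_neg hc, Prod.mk.injEq]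
      exact ⟨rfl, by ring⟩

theorem score_eq_scoreAux (l : List String) : score l = scoreAux 1 l := by
  simp [score, foldl_scoreStep]

theorem scoreAux_findSwap_lt : ∀ (l l' : List String), findSwap l = some l' →
    ∀ s : Int, 0 < s → scoreAux s l' < scoreAux s l := by
  intro l
  fun_induction findSwap l with
  | case1 => intro l' h; simp at h
  | case2 => intro l' h; simp [findSwap] at h
  | case3 a b rest hcs =>
    intro l' h s hs
    simp only [Option.some.injEq] at h
    subst h
    obtain ⟨ha, hb⟩ := hcs
    subst ha; subst hb
    simp [scoreAux_cons]
    linarith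
  | case4 a b rest hcs ih =>
    intro l' h s hs
    cases hr : findSwap (b :: rest) with
    | none => simp [hr] at h
    | some r' =>
      simp only [hr, Option.map_some, Option.some.injEq] at h
      subst h
      by_cases ha : a = "C"
      · rw [scoreAux_cons, scoreAux_cons, if_pos ha, if_pos ha]
        exact ih r' hr (2 * s) (by linarith)
      · rw [scoreAux_cons, scoreAux_cons, if_neg ha, if_neg ha]
        have := ih r' hr s hs
        linarith

theorem score_findSwap_lt (l l' : List String) (h : findSwap l = some l') :
    score l' < score l := by
  rw [score_eq_scoreAux, score_eq_scoreAux]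
  exact scoreAux_findSwap_lt l l' h 1 one_pos

-- A's while-loop: total is always score(program), recomputed after each swap
def solveLoop (d swaps : Int) (prog : List String) : Option Int :=
  if score prog ≤ d then some swaps
  else
    match h : findSwap prog with
    | none => none
    | some p' => solveLoop d (swaps + 1) p'
termination_by (score prog - d).toNat
decreasing_by
  have := score_findSwap_lt prog p' h
  omega

def solve (d : Int) (program : List String) : Option Int := solveLoop d 0 program

-- ===== PORT B =====

-- B's inner while-loop: advance (i, cs) to the first 'C',''S' pair at or after i
def bAdvance (prog : List String) (n : Nat) (i cs : Nat) : Nat × Nat :=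
  if i < n then
    if prog.getD (i - 1) "" = "C" ∧ prog.getD i "" = "S" then (i, cs)
    else bAdvance prog n (i + 1) (if prog.getD (i - 1) "" = "C" then cs + 1 else cs)
  else (i, cs)
termination_by n - i

-- B's outer while-loop: swap in place, subtract 2^cs from total, move the pointer
def bLoop (d : Int) (prog : List String) (n : Nat) (swaps total : Int) (i cs : Nat) :
    Option Int :=
  if total ≤ d then some swaps
  else
    let ic := bAdvance prog n i cs
    if ic.1 < n then
      let prog' := (prog.set (ic.1 - 1) "S").set ic.1 "C"
      if 2 ≤ ic.1 ∧ prog'.getD (ic.1 - 2) "" = "C" then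
        bLoop d prog' n (swaps + 1) (total - 2 ^ ic.2) (ic.1 - 1) (ic.2 - 1)
      else
        bLoop d prog' n (swaps + 1) (total - 2 ^ ic.2) (ic.1 + 1) ic.2
    else none
termination_by (total - d).toNat
decreasing_by
  all_goals
    have h1 : (1 : Int) ≤ 2 ^ ic.2 := one_le_pow₀ (by norm_num)
    have h2 : (2 : Int) ^ (bAdvance prog n i cs).2 = 2 ^ ic.2 := rfl
    omega

def solve_alt (d : Int) (program : List String) : Option Int :=
  let st := program.foldl
    (fun (p : Int × Int) c => if c = "C" then (p.1 * 2, p.2) else (p.1, p.2 + p.1)) (1, 0)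
  bLoop d program program.length 0 st.2 1 0

-- ===== PRECONDITION & SPEC =====
def Spec_solve (d : Int) (program : List String) (out : Option Int) : Prop := out = solve_alt d program
instance (d : Int) (program : List String) (out : Option Int) : Decidable (Spec_solve d program out) := by unfold Spec_solve; infer_instance

-- ===== CLAIM (what is proved, stated in full; the proofs are below) =====
def Claim_equal_solve : Prop := ∀ (d : Int) (program : List String), Dom_solve d program → Spec_solve d program (solve d program)

-- ===== LEMMAS AND PROOFS =====

def cnt (l : List String) : Nat := l.countP (· = "C")

-- "no 'C','S' pair starts before index i - 1"
def noPair (prog : List String) (i : Nat) : Prop :=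
  ∀ j, 1 ≤ j → j < i → ¬ (prog.getD (j - 1) "" = "C" ∧ prog.getD j "" = "S")

theorem cnt_take_succ (l : List String) (k : Nat) (h : k < l.length) :
    cnt (l.take (k + 1)) = cnt (l.take k) + (if l.getD k "" = "C" then 1 else 0) := by
  rw [cnt, cnt, List.take_succ, List.countP_append, List.getElem?_eq_getElem h]
  have hg : l.getD k "" = l[k] := by simp [List.getD, List.getElem?_eq_getElem h]
  rw [hg]
  by_cases hc : l[k] = "C" <;> simp [hc, List.countP_cons]

theorem bAdvance_spec (prog : List String) (i cs : Nat)
    (hi : 1 ≤ i) (hnp : noPair prog i) (hcs : cs = cnt (prog.take (i - 1))) :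
    let r := bAdvance prog prog.length i cs
    1 ≤ r.1 ∧ noPair prog r.1 ∧ r.2 = cnt (prog.take (r.1 - 1)) ∧
      (r.1 < prog.length →
        prog.getD (r.1 - 1) "" = "C" ∧ prog.getD r.1 "" = "S") := by
  fun_induction bAdvance prog prog.length i cs with
  | case1 i cs hlt hpair =>
    exact ⟨hi, hnp, hcs, fun _ => hpair⟩
  | case2 i cs hlt hpair ih =>
    refine ih (by omega) ?_ ?_
    · intro j hj1 hj2
      rcases Nat.lt_or_ge j i with hji | hji
      · exact hnp j hj1 hji
      · have : j = i := by omega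
        subst this; exact hpair
    · have h1 : i - 1 < prog.length := by omega
      have : i - 1 + 1 = i := by omega
      rw [show i + 1 - 1 = (i - 1) + 1 by omega, cnt_take_succ prog (i - 1) h1, ← hcs]
      by_cases hc : prog.getD (i - 1) "" = "C" <;> simp [List.getD] at hc <;> simp [List.getD, hc]
  | case3 i cs hlt =>
    exact ⟨hi, hnp, hcs, fun h => absurd h hlt⟩

theorem findSwap_none (prog : List String)
    (h : ∀ j, 1 ≤ j → j < prog.length →
      ¬ (prog.getD (j - 1) "" = "C" ∧ prog.getD j "" = "S")) :
    findSwap prog = none := by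
  fun_induction findSwap prog with
  | case1 => rfl
  | case2 => rfl
  | case3 a b rest hcs =>
    have h1 := h 1 le_rfl (by simp)
    exact (h1 ⟨hcs.1, hcs.2⟩).elim
  | case4 a b rest hcs ih =>
    have : findSwap (b :: rest) = none := by
      apply ih
      intro j hj1 hj2
      have := h (j + 1) (by omega) (by simp at hj2 ⊢; omega)
      rcases Nat.exists_eq_add_of_le hj1 with ⟨j', rfl⟩
      simpa [Nat.add_comm 1 j', List.getD_cons_succ] using this
    simp [this]

theorem set_set_pair : ∀ (T R : List String),
    ((T ++ "C" :: "S" :: R).set T.length "S").set (T.length + 1) "C" =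
      T ++ "S" :: "C" :: R := by
  intro T R
  induction T with
  | nil => rfl
  | cons a T ih =>
    simp only [List.cons_append, List.length_cons, List.set_cons_succ]
    rw [ih]

theorem findSwap_some : ∀ (i : Nat) (prog : List String), 1 ≤ i → i < prog.length →
    noPair prog i → prog.getD (i - 1) "" = "C" → prog.getD i "" = "S" →
    findSwap prog = some ((prog.set (i - 1) "S").set i "C") := by
  intro i
  induction i with
  | zero => intro prog h; omega
  | succ i ih =>
    intro prog _ hlen hnp hC hS
    rcases prog with _ | ⟨a, _ | ⟨b, rest⟩⟩
    · simp at hlen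
    · simp at hlen
    · rcases Nat.eq_zero_or_pos i with rfl | hi
      · have hC' : a = "C" := hC
        have hS' : b = "S" := hS
        subst hC'; subst hS'
        simp [findSwap, List.set]
      · have hab : ¬ (a = "C" ∧ b = "S") := by
          simpa using hnp 1 le_rfl (by omega)
        have hrec : findSwap (b :: rest) =
            some (((b :: rest).set (i - 1) "S").set i "C") := by
          apply ih (b :: rest) hi (by simp at hlen ⊢; omega)
          · intro j hj1 hj2
            have := hnp (j + 1) (by omega) (by omega)
            rcases Nat.exists_eq_add_of_le hj1 with ⟨j', rfl⟩
            simpa [Nat.add_comm 1 j', List.getD_cons_succ] using this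
          · have : i = (i - 1) + 1 := by omega
            rw [this] at hC
            simpa [List.getD_cons_succ] using hC
          · simpa [List.getD_cons_succ] using hS
        rw [findSwap, if_neg hab, hrec]
        have h1 : i + 1 - 1 = (i - 1) + 1 := by omega
        simp [h1, List.set_cons_succ]

theorem scoreAux_append : ∀ (l1 l2 : List String) (s : Int),
    scoreAux s (l1 ++ l2) = scoreAux s l1 + scoreAux (s * 2 ^ cnt l1) l2 := by
  intro l1
  induction l1 with
  | nil => intro l2 s; simp [scoreAux, cnt]
  | cons c l1 ih =>
    intro l2 s
    rw [List.cons_append, scoreAux_cons, scoreAux_cons]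
    by_cases hc : c = "C"
    · rw [if_pos hc, if_pos hc, ih,
        show cnt (c :: l1) = cnt l1 + 1 from by simp [cnt, List.countP_cons, hc],
        show s * 2 ^ (cnt l1 + 1) = 2 * s * 2 ^ cnt l1 by ring]
    · rw [if_neg hc, if_neg hc, ih,
        show cnt (c :: l1) = cnt l1 from by simp [cnt, List.countP_cons, hc]]
      ring

theorem decomp (prog : List String) (i : Nat) (hi : 1 ≤ i) (hlen : i < prog.length)
    (hC : prog.getD (i - 1) "" = "C") (hS : prog.getD i "" = "S") :
    prog = prog.take (i - 1) ++ "C" :: "S" :: prog.drop (i + 1) ∧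
      (prog.take (i - 1)).length = i - 1 := by
  have h1 : i - 1 < prog.length := by omega
  have hd1 : prog.drop (i - 1) = prog[i - 1] :: prog.drop i := by
    rw [List.drop_eq_getElem_cons h1, show i - 1 + 1 = i by omega]
  have hd2 : prog.drop i = prog[i] :: prog.drop (i + 1) :=
    List.drop_eq_getElem_cons hlen
  have hgC : prog[i - 1] = "C" := by
    simpa [List.getD, List.getElem?_eq_getElem h1] using hC
  have hgS : prog[i] = "S" := by
    simpa [List.getD, List.getElem?_eq_getElem hlen] using hS
  constructor
  · conv_lhs => rw [← List.take_append_drop (i - 1) prog]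
    rw [hd1, hd2, hgC, hgS]
  · simpa using Nat.le_of_lt h1

theorem getD_set_ne (l : List String) (a : String) (i j : Nat) (h : i ≠ j) :
    (l.set i a).getD j "" = l.getD j "" := by
  simp [List.getD, List.getElem?_set_ne h]

theorem take_set_of_le (l : List String) (a : String) (i k : Nat) (h : k ≤ i) :
    (l.set i a).take k = l.take k := by
  rw [List.take_set]
  exact List.set_eq_of_length_le (by simpa using Nat.le_trans (Nat.min_le_left _ _) h)

theorem score_swap (prog : List String) (i : Nat) (hi : 1 ≤ i) (hlen : i < prog.length)
    (hC : prog.getD (i - 1) "" = "C") (hS : prog.getD i "" = "S") :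
    score ((prog.set (i - 1) "S").set i "C") =
      score prog - 2 ^ cnt (prog.take (i - 1)) := by
  obtain ⟨hdec, hT⟩ := decomp prog i hi hlen hC hS
  set T := prog.take (i - 1) with hTdef
  set R := prog.drop (i + 1) with hRdef
  have hset : (prog.set (i - 1) "S").set i "C" = T ++ "S" :: "C" :: R := by
    conv_lhs => rw [hdec]
    rw [show i - 1 = T.length from hT.symm, show i = T.length + 1 by omega]
    exact set_set_pair T R
  rw [hset, score_eq_scoreAux, scoreAux_append]
  conv_rhs => rw [hdec, score_eq_scoreAux, scoreAux_append]
  simp [scoreAux_cons]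
  ring

theorem loop_eq : ∀ (k : Nat) (d : Int) (prog : List String) (swaps : Int) (i cs : Nat),
    (score prog - d).toNat ≤ k → 1 ≤ i → noPair prog i →
    cs = cnt (prog.take (i - 1)) →
    bLoop d prog prog.length swaps (score prog) i cs = solveLoop d swaps prog := by
  intro k
  induction k with
  | zero =>
    intro d prog swaps i cs hk _ _ _
    have hle : score prog ≤ d := by omega
    rw [bLoop]; rw [solveLoop]; rw [if_pos hle, if_pos hle]
  | succ k ih =>
    intro d prog swaps i cs hk hi hnp hcs
    by_cases hle : score prog ≤ d
    · rw [bLoop]; rw [solveLoop]; rw [if_pos hle, if_pos hle]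
    · have hspec := bAdvance_spec prog i cs hi hnp hcs
      rcases hhr : bAdvance prog prog.length i cs with ⟨i1, c1⟩
      rw [hhr] at hspec
      obtain ⟨hr1, hrnp, hrcs, hrpair⟩ := hspec
      dsimp only at hr1 hrnp hrcs hrpair
      by_cases hlt : i1 < prog.length
      · obtain ⟨hC, hS⟩ := hrpair hlt
        have hfs : findSwap prog = some ((prog.set (i1 - 1) "S").set i1 "C") :=
          findSwap_some i1 prog hr1 hlt hrnp hC hS
        set prog' := (prog.set (i1 - 1) "S").set i1 "C" with hp'
        have hlen' : prog'.length = prog.length := by simp [hp']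
        have hsc : score prog' = score prog - 2 ^ c1 := by
          rw [hp', score_swap prog i1 hr1 hlt hC hS, hrcs]
        have h2pow : (1 : Int) ≤ 2 ^ c1 := one_le_pow₀ (by norm_num)
        have hk' : (score prog' - d).toNat ≤ k := by omega
        have hgd : ∀ j, j < i1 - 1 → prog'.getD j "" = prog.getD j "" := by
          intro j hj
          rw [hp', getD_set_ne _ _ _ _ (by omega), getD_set_ne _ _ _ _ (by omega)]
        have hgdS : prog'.getD (i1 - 1) "" = "S" := by
          rw [hp', getD_set_ne _ _ _ _ (by omega)]
          simp [List.getD, List.getElem?_set_self (by omega : i1 - 1 < prog.length)]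
        have hsolve : solveLoop d swaps prog = solveLoop d (swaps + 1) prog' := by
          rw [solveLoop]; rw [if_neg hle]
          split
          · rename_i heq; rw [heq] at hfs; simp at hfs
          · rename_i p2 heq; rw [heq] at hfs; injection hfs with h2; rw [h2]
        rw [hsolve]
        rw [bLoop]; rw [if_neg hle]
        simp only [hhr]
        rw [if_pos hlt, ← hp']
        by_cases hcase : 2 ≤ i1 ∧ prog'.getD (i1 - 2) "" = "C"
        · rw [if_pos hcase]
          have hiC : prog.getD (i1 - 2) "" = "C" := by
            rw [← hgd (i1 - 2) (by omega)]; exact hcase.2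
          have hnp' : noPair prog' (i1 - 1) := by
            intro j hj1 hj2
            rw [hgd (j - 1) (by omega), hgd j (by omega)]
            exact hrnp j hj1 (by omega)
          have hcs' : c1 - 1 = cnt (prog'.take (i1 - 1 - 1)) := by
            have ht : prog'.take (i1 - 2) = prog.take (i1 - 2) := by
              rw [hp', take_set_of_le _ _ _ _ (by omega), take_set_of_le _ _ _ _ (by omega)]
            have h2 : i1 - 2 < prog.length := by omega
            have hstep : cnt (prog.take (i1 - 1)) = cnt (prog.take (i1 - 2)) + 1 := by
              rw [show i1 - 1 = (i1 - 2) + 1 by omega, cnt_take_succ prog _ h2, if_pos hiC]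
            rw [show i1 - 1 - 1 = i1 - 2 by omega, ht]
            omega
          rw [← hsc, ← hlen']
          exact ih d prog' (swaps + 1) (i1 - 1) (c1 - 1) hk' (by omega) hnp' hcs'
        · rw [if_neg hcase]
          have hnp' : noPair prog' (i1 + 1) := by
            intro j hj1 hj2
            rcases Nat.lt_or_ge j (i1 - 1) with hj | hj
            · rw [hgd (j - 1) (by omega), hgd j (by omega)]
              exact hrnp j hj1 (by omega)
            · rcases Nat.eq_or_lt_of_le hj with hj2' | hj2'
              · intro hpair
                have h2le : 2 ≤ i1 := by omega
                exact hcase ⟨h2le, by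
                  have hidx : j - 1 = i1 - 2 := by omega
                  rw [← hidx]; exact hpair.1⟩
              · intro hpair
                have h1 := hpair.1
                rw [show j - 1 = i1 - 1 by omega, hgdS] at h1
                exact absurd h1 (by decide)
          have hcs' : c1 = cnt (prog'.take (i1 + 1 - 1)) := by
            have ht : prog'.take (i1 - 1) = prog.take (i1 - 1) := by
              rw [hp', take_set_of_le _ _ _ _ (by omega), take_set_of_le _ _ _ _ le_rfl]
            have h1 : i1 - 1 < prog'.length := by omega
            rw [show i1 + 1 - 1 = (i1 - 1) + 1 by omega, cnt_take_succ prog' _ h1,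
              if_neg (by rw [hgdS]; decide), ht]
            omega
          rw [← hsc, ← hlen']
          exact ih d prog' (swaps + 1) (i1 + 1) c1 hk' (by omega) hnp' hcs'
      · have hfs : findSwap prog = none := by
          apply findSwap_none
          intro j hj1 hj2
          exact hrnp j hj1 (by omega)
        rw [solveLoop]; rw [if_neg hle]
        rw [bLoop]; rw [if_neg hle]
        simp only [hhr]
        rw [if_neg hlt]
        split
        · rfl
        · rename_i p2 heq; rw [heq] at hfs; simp at hfs

-- ===== VERDICT (by name: the statement is the Claim_ definition above) =====
theorem solve_spec : Claim_equal_solve := by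
  intro d program _
  have halt : solve_alt d program = bLoop d program program.length 0 (score program) 1 0 := rfl
  have ha : solve d program = solveLoop d 0 program := rfl
  unfold Spec_solve
  rw [halt, ha]
  exact (loop_eq (score program - d).toNat d program 0 1 0 le_rfl le_rfl
    (by intro j hj1 hj2; omega) (by simp [cnt])).symm
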